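-- pv_equiv track=rewrite | github.com/MrBrantCode/unitest_baseline | mut_generate/mist_train_taco/taco_18279/solution.py | find_gcd_in_range
-- ===== SOURCE A (Python) =====
-- import math
-- from bisect import bisect_right
--
-- def find_gcd_in_range(a, b, queries):
--     gcd = math.gcd(a, b)
--     factors = []
--     i = 1
--     while i * i <= gcd:
--         if gcd % i == 0:
--             factors.append(i)
--             if i * i != gcd:
--                 factors.append(gcd // i)
--         i += 1
--     factors.sort()
--
--     results = []
--     for (low, high) in queries:
--         ans = -1
--         index = bisect_right(factors, high)
--         if index > 0 and factors[index - 1] >= low: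
--             ans = factors[index - 1]
--         results.append(ans)
--
--     return results
-- ===== SOURCE B (Python) =====
-- import math
--
-- def find_gcd_in_range(a, b, queries):
--     # Answer each query by a direct scan over the divisors of gcd(a, b),
--     # found on the fly in i, gcd//i pairs; no divisor list, no sort, no bisect.
--     g = math.gcd(a, b)
--     results = []
--     for (low, high) in queries:
--         best = -1
--         i = 1
--         while i * i <= g:
--             if g % i == 0:
--                 for d in (i, g // i):
--                     if low <= d <= high and d > best:
--                         best = d
--             i += 1
--         results.append(best)
--     return results
-- ===== Notes on version B (the rewrite author's own statement) =====
-- stated objective: simpler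
-- what changed: B drops the precomputed sorted divisor list and the per-query binary search; each query is answered directly by one max-scan over the divisor pairs (i, gcd//i) of gcd(a,b), so no list, no sort and no bisect are needed.
import Mathlib
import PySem

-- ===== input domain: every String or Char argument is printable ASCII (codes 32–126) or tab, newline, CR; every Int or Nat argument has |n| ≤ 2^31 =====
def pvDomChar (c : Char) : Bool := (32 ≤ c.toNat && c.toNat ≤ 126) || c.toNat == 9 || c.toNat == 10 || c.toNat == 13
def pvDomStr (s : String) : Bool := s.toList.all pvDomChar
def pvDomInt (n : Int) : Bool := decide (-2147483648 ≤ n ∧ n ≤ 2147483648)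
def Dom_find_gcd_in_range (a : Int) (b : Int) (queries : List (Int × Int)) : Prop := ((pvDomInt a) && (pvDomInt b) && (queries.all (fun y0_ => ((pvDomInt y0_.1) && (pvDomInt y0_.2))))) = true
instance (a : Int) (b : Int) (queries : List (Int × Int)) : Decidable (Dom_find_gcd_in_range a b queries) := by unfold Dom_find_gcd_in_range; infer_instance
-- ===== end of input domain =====

-- B answers each query by a direct max-scan over the divisor pairs (i, gcd//i) of gcd(a,b),
-- instead of A's precomputed sorted divisor list with a per-query binary search (objective: simpler).

-- ===== PORT A =====

-- loop needs: while the guard i*i ≤ g holds, i ≤ g, so g+1-i decreases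
theorem pv_le_of_sq_le {i g : Int} (h : i * i ≤ g) : i ≤ g := by
  by_cases hi : i ≤ 0
  · nlinarith [mul_self_nonneg i]
  · nlinarith [mul_self_nonneg (i - 1)]

-- A's divisor-collecting while loop: state (i, factors)
def aFactorsLoop (g : Int) (i : Int) (acc : List Int) : List Int :=
  if h : i * i ≤ g then
    aFactorsLoop g (i + 1)
      (if PySem.Int.mod g i = 0 then
        acc ++ [i] ++ (if i * i ≠ g then [PySem.Int.floordiv g i] else [])
      else acc)
  else acc
termination_by (g + 1 - i).toNat
decreasing_by have := pv_le_of_sq_le h; omega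

-- body of A's per-query for loop (bisect_right = PySem.List.bisectRight)
def aAns (factors : List Int) (low : Int) (high : Int) : Int :=
  let index := PySem.List.bisectRight factors high
  if 0 < index ∧ low ≤ factors.getD (index - 1) 0 then factors.getD (index - 1) 0 else -1

def find_gcd_in_range (a : Int) (b : Int) (queries : List (Int × Int)) : List Int :=
  let gcd : Int := Int.gcd a b
  let factors := PySem.List.sorted (aFactorsLoop gcd 1 []) (fun x => x)
  queries.foldl (fun results q => results ++ [aAns factors q.1 q.2]) []

-- ===== PORT B =====

-- B's per-query while loop: running maximum over the divisor pairs (i, g//i)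
def bBestLoop (g : Int) (low : Int) (high : Int) (i : Int) (best : Int) : Int :=
  if h : i * i ≤ g then
    bBestLoop g low high (i + 1)
      (if PySem.Int.mod g i = 0 then
        let b1 := if low ≤ i ∧ i ≤ high ∧ best < i then i else best
        let d2 := PySem.Int.floordiv g i
        if low ≤ d2 ∧ d2 ≤ high ∧ b1 < d2 then d2 else b1
      else best)
  else best
termination_by (g + 1 - i).toNat
decreasing_by have := pv_le_of_sq_le h; omega

def find_gcd_in_range_alt (a : Int) (b : Int) (queries : List (Int × Int)) : List Int :=
  let g : Int := Int.gcd a b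
  queries.foldl (fun results q => results ++ [bBestLoop g q.1 q.2 1 (-1)]) []

-- ===== PRECONDITION & SPEC =====
def Spec_find_gcd_in_range (a : Int) (b : Int) (queries : List (Int × Int)) (out : List Int) : Prop := out = find_gcd_in_range_alt a b queries
instance (a : Int) (b : Int) (queries : List (Int × Int)) (out : List Int) : Decidable (Spec_find_gcd_in_range a b queries out) := by unfold Spec_find_gcd_in_range; infer_instance

-- ===== CLAIM (what is proved, stated in full; the proofs are below) =====
def Claim_equal_find_gcd_in_range : Prop := ∀ (a : Int) (b : Int) (queries : List (Int × Int)), Dom_find_gcd_in_range a b queries → Spec_find_gcd_in_range a b queries (find_gcd_in_range a b queries)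

-- ===== LEMMAS AND PROOFS =====

-- the update step of B's running maximum
def pvStep (low high : Int) (b : Int) (d : Int) : Int :=
  if low ≤ d ∧ d ≤ high ∧ b < d then d else b

theorem pvStep_idem (low high b d : Int) :
    pvStep low high (pvStep low high b d) d = pvStep low high b d := by
  unfold pvStep; split_ifs <;> omega

theorem pv_floordiv_mul (i c : Int) (hi : 1 ≤ i) : PySem.Int.floordiv (i * c) i = c := by
  rw [PySem.Int.floordiv_eq_iff_of_pos (show (0:Int) < i by omega)]
  constructor <;> nlinarith

-- accumulator generalization of A's factor loop
theorem aFactorsLoop_acc (g : Int) : ∀ (n : Nat) (i : Int), (g + 1 - i).toNat = n →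
    ∀ acc : List Int, aFactorsLoop g i acc = acc ++ aFactorsLoop g i [] := by
  intro n
  induction n using Nat.strong_induction_on with
  | _ n ih =>
    intro i hn acc
    by_cases hle : i * i ≤ g
    · have hi := pv_le_of_sq_le hle
      have hlt : (g + 1 - (i + 1)).toNat < n := by omega
      conv_lhs => rw [aFactorsLoop]
      conv_rhs => rw [aFactorsLoop]
      simp only [dif_pos hle]
      by_cases hmod : PySem.Int.mod g i = 0
      · by_cases hsq : i * i ≠ g
        · simp only [if_pos hmod, if_pos hsq]
          rw [ih _ hlt _ rfl (acc ++ [i] ++ [PySem.Int.floordiv g i]),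
              ih _ hlt _ rfl ([] ++ [i] ++ [PySem.Int.floordiv g i])]
          simp
        · simp only [if_pos hmod, if_neg hsq]
          rw [ih _ hlt _ rfl (acc ++ [i] ++ []), ih _ hlt _ rfl ([] ++ [i] ++ [])]
          simp
      · simp only [if_neg hmod]
        rw [ih _ hlt _ rfl acc]
    · conv_lhs => rw [aFactorsLoop]
      conv_rhs => rw [aFactorsLoop]
      simp [hle]

-- B's loop is the fold of pvStep over A's (unsorted) factor list
theorem bBestLoop_eq_foldl (g low high : Int) : ∀ (n : Nat) (i : Int), (g + 1 - i).toNat = n →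
    1 ≤ i → ∀ best : Int,
    bBestLoop g low high i best = List.foldl (pvStep low high) best (aFactorsLoop g i []) := by
  intro n
  induction n using Nat.strong_induction_on with
  | _ n ih =>
    intro i hn hi1 best
    by_cases hle : i * i ≤ g
    · have hi := pv_le_of_sq_le hle
      have hlt : (g + 1 - (i + 1)).toNat < n := by omega
      rw [bBestLoop, aFactorsLoop]
      simp only [dif_pos hle]
      rw [aFactorsLoop_acc g _ _ rfl, List.foldl_append]
      rw [ih _ hlt _ rfl (by omega)]
      congr 1
      by_cases hmod : PySem.Int.mod g i = 0
      · simp only [if_pos hmod]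
        by_cases hsq : i * i ≠ g
        · simp [hsq, pvStep]
        · have hsq : i * i = g := not_not.mp hsq
          have hdiv : PySem.Int.floordiv g i = i := by
            rw [← hsq]; exact pv_floordiv_mul i i hi1
          simp only [hsq, ne_eq, not_true_eq_false, if_false, List.append_nil, hdiv,
            List.nil_append, List.foldl_cons, List.foldl_nil]
          exact pvStep_idem low high best i
      · simp [hmod]
    · rw [bBestLoop, aFactorsLoop]; simp [hle]

-- folding pvStep is folding max over the in-range elements
theorem foldl_pvStep_eq (low high : Int) : ∀ (l : List Int) (b : Int),
    List.foldl (pvStep low high) b l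
      = List.foldl max b (l.filter (fun d => decide (low ≤ d ∧ d ≤ high))) := by
  intro l
  induction l with
  | nil => intro b; rfl
  | cons x t ih =>
    intro b
    by_cases hx : low ≤ x ∧ x ≤ high
    · have hstep : pvStep low high b x = max b x := by unfold pvStep; split_ifs <;> omega
      rw [List.foldl_cons, List.filter_cons, hstep, if_pos (by simpa using hx),
        List.foldl_cons, ih]
    · have hstep : pvStep low high b x = b := by unfold pvStep; split_ifs <;> omega
      rw [List.foldl_cons, List.filter_cons, hstep, if_neg (by simpa using hx), ih]

-- every collected factor is ≥ 1
theorem aFactorsLoop_mem_pos (g : Int) : ∀ (n : Nat) (i : Int), (g + 1 - i).toNat = n →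
    1 ≤ i → ∀ x ∈ aFactorsLoop g i [], 1 ≤ x := by
  intro n
  induction n using Nat.strong_induction_on with
  | _ n ih =>
    intro i hn hi1 x hx
    by_cases hle : i * i ≤ g
    · have hi := pv_le_of_sq_le hle
      have hlt : (g + 1 - (i + 1)).toNat < n := by omega
      rw [aFactorsLoop] at hx
      simp only [dif_pos hle] at hx
      rw [aFactorsLoop_acc g _ _ rfl] at hx
      have hrest : x ∈ aFactorsLoop g (i + 1) [] → 1 ≤ x := ih _ hlt _ rfl (by omega) x
      have hdivpos : PySem.Int.mod g i = 0 → 1 ≤ PySem.Int.floordiv g i := by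
        intro hmod
        obtain ⟨c, hc⟩ := (PySem.Int.mod_eq_zero_iff_dvd g i).mp hmod
        rw [hc, pv_floordiv_mul i c hi1]
        nlinarith
      by_cases hmod : PySem.Int.mod g i = 0
      · by_cases hsq : i * i ≠ g
        · simp only [if_pos hmod, if_pos hsq, List.nil_append, List.mem_append,
            List.mem_singleton] at hx
          rcases hx with (hx | hx) | hx
          · omega
          · subst hx; exact hdivpos hmod
          · exact hrest hx
        · simp only [if_pos hmod, if_neg hsq, List.nil_append, List.append_nil,
            List.mem_append, List.mem_singleton] at hx
          rcases hx with hx | hx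
          · omega
          · exact hrest hx
      · simp only [if_neg hmod, List.nil_append] at hx
        exact hrest hx
    · rw [aFactorsLoop] at hx; simp [hle] at hx

-- A's bisect answer on a sorted list is the max of the in-range elements (or -1)
theorem aAns_eq_foldl_max (S : List Int) (low high : Int)
    (hs : S.Pairwise (· ≤ ·)) (hpos : ∀ x ∈ S, (-1 : Int) ≤ x) :
    aAns S low high
      = List.foldl max (-1) (S.filter (fun d => decide (low ≤ d ∧ d ≤ high))) := by
  obtain ⟨hk_le, hbefore, hafter⟩ := PySem.List.bisectRight_spec S high hs
  set k := PySem.List.bisectRight S high with hk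
  set T := S.filter (fun d => decide (low ≤ d ∧ d ≤ high)) with hT
  have hmemT : ∀ x, x ∈ T ↔ x ∈ S ∧ low ≤ x ∧ x ≤ high := by
    intro x; simp [hT, List.mem_filter]
  by_cases hcond : 0 < k ∧ low ≤ S.getD (k - 1) 0
  · have hk1 : k - 1 < S.length := by omega
    have hget : S.getD (k - 1) 0 = S[k - 1] := List.getD_eq_getElem S 0 hk1
    have hmem : S[k - 1] ∈ T := by
      rw [hmemT]
      exact ⟨List.getElem_mem hk1, by rw [← hget]; exact hcond.2, hbefore (k - 1) hk1 (by omega)⟩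
    have hle : S[k - 1] ≤ List.foldl max (-1) T := (PySem.List.le_foldl_max T (-1)).2 _ hmem
    have hge : List.foldl max (-1) T ≤ S[k - 1] := by
      rcases PySem.List.foldl_max_mem T (-1) with hM | hM
      · rw [hM]; exact hpos _ (List.getElem_mem hk1)
      · obtain ⟨hMS, hMlow, hMhigh⟩ := (hmemT _).mp hM
        obtain ⟨j, hj, hMj⟩ := List.getElem_of_mem hMS
        have hjk : j < k := by
          by_contra hc
          exact absurd (hafter j hj (by omega)) (by rw [hMj]; omega)
        rw [← hMj]
        rcases Nat.lt_or_ge j (k - 1) with hjlt | hjge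
        · exact List.pairwise_iff_getElem.mp hs j (k - 1) hj hk1 hjlt
        · have : j = k - 1 := by omega
          subst this; exact le_refl _
    show (if 0 < k ∧ low ≤ S.getD (k - 1) 0 then S.getD (k - 1) 0 else -1) = List.foldl max (-1) T
    rw [if_pos hcond, hget]
    exact le_antisymm hle hge
  · have hTnil : T = [] := by
      rw [List.eq_nil_iff_forall_not_mem]
      intro x hx
      obtain ⟨hxS, hxlow, hxhigh⟩ := (hmemT x).mp hx
      obtain ⟨j, hj, hxj⟩ := List.getElem_of_mem hxS
      have hjk : j < k := by
        by_contra hc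
        exact absurd (hafter j hj (by omega)) (by rw [hxj]; omega)
      have hk0 : 0 < k := by omega
      have hk1 : k - 1 < S.length := by omega
      have hjle : S[j] ≤ S[k - 1] := by
        rcases Nat.lt_or_ge j (k - 1) with hjlt | hjge
        · exact List.pairwise_iff_getElem.mp hs j (k - 1) hj hk1 hjlt
        · have : j = k - 1 := by omega
          subst this; exact le_refl _
      apply hcond
      refine ⟨hk0, ?_⟩
      rw [List.getD_eq_getElem S 0 hk1]
      rw [hxj] at hjle
      omega
    show (if 0 < k ∧ low ≤ S.getD (k - 1) 0 then S.getD (k - 1) 0 else -1) = List.foldl max (-1) T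
    rw [if_neg hcond, hTnil]
    rfl

-- ===== VERDICT (by name: the statement is the Claim_ definition above) =====
theorem find_gcd_in_range_spec : Claim_equal_find_gcd_in_range := by
  intro a b queries _
  unfold Spec_find_gcd_in_range find_gcd_in_range find_gcd_in_range_alt
  set g : Int := (Int.gcd a b : Int) with hg
  set F := aFactorsLoop g 1 [] with hF
  set S := PySem.List.sorted F (fun x => x) with hS
  have hperm : S.Perm F := PySem.List.sorted_perm F _ false
  have hq : ∀ lo hi : Int, aAns S lo hi = bBestLoop g lo hi 1 (-1) := by
    intro lo hi
    have hsorted : S.Pairwise (· ≤ ·) := PySem.List.sorted_pairwise F (fun x => x)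
    have hpos : ∀ x ∈ S, (-1 : Int) ≤ x := by
      intro x hx
      have hxF : x ∈ F := hperm.mem_iff.mp hx
      have := aFactorsLoop_mem_pos g _ 1 rfl (by omega) x hxF
      omega
    rw [bBestLoop_eq_foldl g lo hi _ 1 rfl (by omega), foldl_pvStep_eq,
      aAns_eq_foldl_max S lo hi hsorted hpos]
    letI : RightCommutative (max : Int → Int → Int) := ⟨fun b x y => max_right_comm b x y⟩
    exact List.Perm.foldl_eq (hperm.filter _) (-1)
  simp only [PySem.List.foldl_append_singleton_eq_map, List.nil_append]
  exact List.map_congr_left (fun q _ => hq q.1 q.2)
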